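-- pv_equiv track=rewrite | github.com/Miaou/PyPlagia | pyplagia/sim.py | simDetectBlocks
-- ===== SOURCE A (Python) =====
-- import token
--
-- def simDetectBlocks(lTokin):
--     ll = []
--     a = 0
--     N = 3 # Should separate if statement and for loops in methods of classes
--     for i,x in enumerate(lTokin):
--         if x in (token.INDENT, token.DEDENT) and N>0:
--             ll.append(lTokin[a:i])
--             a = i
--         if x == token.INDENT:
--             N -= 1
--         elif x == token.DEDENT:
--             N += 1
--     ll.append( lTokin[a:] )
--     return ll
-- ===== SOURCE B (Python) =====
-- _INDENT, _DEDENT = 5, 6  # token.INDENT, token.DEDENT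
--
-- def simDetectBlocks(lTokin):
--     # Recursive decomposition: split off everything up to the first block
--     # boundary, recurse on the remainder, and cons the boundary token onto
--     # the first block of the recursive result.
--     return _split(lTokin, 3)
--
-- def _split(seg, N):
--     for i, x in enumerate(seg):
--         if x in (_INDENT, _DEDENT) and N > 0:
--             rest = _split(seg[i + 1:], N - 1 if x == _INDENT else N + 1)
--             return [seg[:i], [x] + rest[0]] + rest[1:]
--         if x == _INDENT:
--             N -= 1
--         elif x == _DEDENT:
--             N += 1
--     return [seg]
-- ===== Notes on version B (the rewrite author's own statement) =====
-- stated objective: alternative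
-- what changed: A builds all blocks in one mutating pass over the whole list (appending a slice and moving a start index at each boundary); B is recursive: it finds only the first boundary, recurses on the suffix after it, and conses the boundary token onto the first block of the recursive result.
import Mathlib
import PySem

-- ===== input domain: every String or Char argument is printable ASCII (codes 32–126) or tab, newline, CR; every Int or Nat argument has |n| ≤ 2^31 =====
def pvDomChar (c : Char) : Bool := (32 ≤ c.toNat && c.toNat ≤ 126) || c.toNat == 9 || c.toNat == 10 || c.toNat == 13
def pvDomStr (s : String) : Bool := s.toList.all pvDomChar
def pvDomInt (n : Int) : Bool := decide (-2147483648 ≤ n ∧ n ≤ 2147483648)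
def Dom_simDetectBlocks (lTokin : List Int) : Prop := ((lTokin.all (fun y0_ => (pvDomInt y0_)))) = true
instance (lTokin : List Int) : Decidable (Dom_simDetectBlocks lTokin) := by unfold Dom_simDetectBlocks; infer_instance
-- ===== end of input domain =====

-- B replaces A's single mutating accumulator pass by a recursive decomposition: cut off the
-- prefix before the first boundary, recurse on the remainder, cons the boundary token onto the
-- first recursive block (objective: alternative, same cost); return values proved equal.

-- ===== PORT A =====
-- token.INDENT = 5, token.DEDENT = 6
-- the for loop over enumerate(lTokin), state (ll, a, N), i the running index
def pvALoop (full : List Int) : List Int → Nat → List (List Int) → Nat → Int → List (List Int) × Nat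
  | [], _, ll, a, _ => (ll, a)
  | x :: xs, i, ll, a, N =>
    let st := if (x = 5 ∨ x = 6) ∧ N > 0
      then (ll ++ [PySem.List.slice full (some (a : Int)) (some (i : Int))], i)
      else (ll, a)
    let N' := if x = 5 then N - 1 else if x = 6 then N + 1 else N
    pvALoop full xs (i + 1) st.1 st.2 N'

def simDetectBlocks (lTokin : List Int) : List (List Int) :=
  let st := pvALoop lTokin lTokin 0 [] 0 3
  st.1 ++ [PySem.List.slice lTokin (some (st.2 : Int)) none]   -- ll.append(lTokin[a:])

-- ===== PORT B =====
-- the for loop of _split up to its early return: first index i with seg[i] a boundary while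
-- N > 0, together with seg[i] and the N updated by seg[i]; none if the loop runs out
def pvScan : List Int → Int → Option (Nat × Int × Int)
  | [], _ => none
  | x :: xs, N =>
    if (x = 5 ∨ x = 6) ∧ N > 0 then some (0, x, if x = 5 then N - 1 else N + 1)
    else
      match pvScan xs (if x = 5 then N - 1 else if x = 6 then N + 1 else N) with
      | none => none
      | some (j, y, N2) => some (j + 1, y, N2)

-- needed by pvSplit's termination: a found index points at a real element
theorem pvScan_drop : ∀ (seg : List Int) (N : Int) (j : Nat) (x N2 : Int),
    pvScan seg N = some (j, x, N2) → seg.drop j = x :: seg.drop (j + 1) := by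
  intro seg
  induction seg with
  | nil => intro N j x N2 h; simp [pvScan] at h
  | cons y ys ih =>
    intro N j x N2 h
    simp only [pvScan] at h
    by_cases hc : (y = 5 ∨ y = 6) ∧ N > 0
    · rw [if_pos hc] at h
      obtain ⟨rfl, rfl, rfl⟩ : j = 0 ∧ y = x ∧ (if y = 5 then N - 1 else N + 1) = N2 := by
        cases h; exact ⟨rfl, rfl, rfl⟩
      simp
    · rw [if_neg hc] at h
      cases hscan : pvScan ys (if y = 5 then N - 1 else if y = 6 then N + 1 else N) with
      | none => rw [hscan] at h; cases h
      | some t =>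
        obtain ⟨j', y', N2'⟩ := t
        rw [hscan] at h
        obtain ⟨rfl, rfl, rfl⟩ : j = j' + 1 ∧ y' = x ∧ N2' = N2 := by
          cases h; exact ⟨rfl, rfl, rfl⟩
        simpa using ih _ _ _ _ hscan

-- _split: cut at the first boundary, recurse on the suffix after it, cons the boundary token
-- onto the first recursive block (the [] arm is unreachable: pvSplit never returns [])
def pvSplit (seg : List Int) (N : Int) : List (List Int) :=
  match h : pvScan seg N with
  | none => [seg]
  | some (j, x, N2) =>
    match pvSplit (PySem.List.slice seg (some ((j : Int) + 1)) none) N2 with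
    | [] => [PySem.List.slice seg none (some (j : Int))]
    | r :: rs => PySem.List.slice seg none (some (j : Int)) :: (x :: r) :: rs
termination_by seg.length
decreasing_by
  have hd := pvScan_drop seg N j x N2 h
  have hj : j < seg.length := by
    by_contra hge
    rw [List.drop_eq_nil_of_le (by omega)] at hd
    simp at hd
  have hs : ((j : Int) + 1) = ((j + 1 : Nat) : Int) := by push_cast; ring
  rw [hs, PySem.List.slice_from_natCast]
  simp
  omega

def simDetectBlocks_alt (lTokin : List Int) : List (List Int) := pvSplit lTokin 3

-- ===== PRECONDITION & SPEC =====
def Spec_simDetectBlocks (lTokin : List Int) (out : List (List Int)) : Prop := out = simDetectBlocks_alt lTokin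
instance (lTokin : List Int) (out : List (List Int)) : Decidable (Spec_simDetectBlocks lTokin out) := by unfold Spec_simDetectBlocks; infer_instance

-- ===== CLAIM (what is proved, stated in full; the proofs are below) =====
def Claim_equal_simDetectBlocks : Prop := ∀ (lTokin : List Int), Dom_simDetectBlocks lTokin → Spec_simDetectBlocks lTokin (simDetectBlocks lTokin)

-- ===== LEMMAS AND PROOFS =====

-- prepend a prefix onto the first block (the head of pvSplit's result)
def pvConsHead (p : List Int) : List (List Int) → List (List Int)
  | [] => [p]
  | b :: bs => (p ++ b) :: bs

theorem pvSplit_eq_none {seg : List Int} {N : Int} (h : pvScan seg N = none) :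
    pvSplit seg N = [seg] := by
  rw [pvSplit]
  split
  · rfl
  · rename_i j x N2 heq; rw [h] at heq; cases heq

theorem pvSplit_eq_some {seg : List Int} {N : Int} {j : Nat} {x N2 : Int}
    (h : pvScan seg N = some (j, x, N2)) :
    pvSplit seg N =
      match pvSplit (PySem.List.slice seg (some ((j : Int) + 1)) none) N2 with
      | [] => [PySem.List.slice seg none (some (j : Int))]
      | r :: rs => PySem.List.slice seg none (some (j : Int)) :: (x :: r) :: rs := by
  rw [pvSplit]
  split
  · rename_i heq; rw [h] at heq; cases heq
  · rename_i j1 x1 N21 heq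
    rw [h] at heq
    cases heq
    rfl

theorem pvSplit_ne_nil (seg : List Int) (N : Int) : pvSplit seg N ≠ [] := by
  rw [pvSplit]
  split
  · simp
  · split <;> simp

-- the A loop does nothing to (ll, a) when no boundary fires
theorem pvALoop_scan_none : ∀ (xs : List Int) (N : Int), pvScan xs N = none →
    ∀ (full : List Int) (i : Nat) (ll : List (List Int)) (a : Nat),
      pvALoop full xs i ll a N = (ll, a) := by
  intro xs
  induction xs with
  | nil => intro N _ full i ll a; simp [pvALoop]
  | cons x xs ih =>
    intro N h full i ll a
    simp only [pvScan] at h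
    by_cases hc : (x = 5 ∨ x = 6) ∧ N > 0
    · rw [if_pos hc] at h; cases h
    · rw [if_neg hc] at h
      cases hscan : pvScan xs (if x = 5 then N - 1 else if x = 6 then N + 1 else N) with
      | none =>
        simp only [pvALoop, if_neg hc]
        exact ih _ hscan full (i + 1) ll a
      | some t => rw [hscan] at h; cases h

-- the A loop up to and including the first boundary
theorem pvALoop_scan_some : ∀ (xs : List Int) (N : Int) (j : Nat) (x N2 : Int),
    pvScan xs N = some (j, x, N2) →
    ∀ (full : List Int) (i : Nat) (ll : List (List Int)) (a : Nat),
      pvALoop full xs i ll a N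
        = pvALoop full (xs.drop (j + 1)) (i + j + 1)
            (ll ++ [PySem.List.slice full (some (a : Int)) (some ((i + j : Nat) : Int))])
            (i + j) N2 := by
  intro xs
  induction xs with
  | nil => intro N j x N2 h; simp [pvScan] at h
  | cons y ys ih =>
    intro N j x N2 h full i ll a
    simp only [pvScan] at h
    by_cases hc : (y = 5 ∨ y = 6) ∧ N > 0
    · rw [if_pos hc] at h
      obtain ⟨rfl, rfl, rfl⟩ : j = 0 ∧ y = x ∧ (if y = 5 then N - 1 else N + 1) = N2 := by
        cases h; exact ⟨rfl, rfl, rfl⟩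
      simp only [pvALoop, if_pos hc]
      have hx : (if y = 5 then N - 1 else if y = 6 then N + 1 else N)
          = (if y = 5 then N - 1 else N + 1) := by
        rcases hc.1 with rfl | rfl <;> simp
      rw [hx]
      simp
    · rw [if_neg hc] at h
      cases hscan : pvScan ys (if y = 5 then N - 1 else if y = 6 then N + 1 else N) with
      | none => rw [hscan] at h; cases h
      | some t =>
        obtain ⟨j', y', N2'⟩ := t
        rw [hscan] at h
        obtain ⟨rfl, rfl, rfl⟩ : j = j' + 1 ∧ y' = x ∧ N2' = N2 := by
          cases h; exact ⟨rfl, rfl, rfl⟩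
        simp only [pvALoop, if_neg hc]
        rw [ih _ _ _ _ hscan full (i + 1) ll a]
        have e1 : i + 1 + j' = i + (j' + 1) := by omega
        rw [e1]
        rfl

-- main invariant: the A loop's pending block full[a:i] extends B's first block of the suffix
theorem pvMain : ∀ (n : Nat) (seg : List Int), seg.length ≤ n →
    ∀ (full : List Int) (i a : Nat) (ll : List (List Int)) (N : Int),
      seg = full.drop i → a ≤ i →
      (pvALoop full seg i ll a N).1
          ++ [PySem.List.slice full (some (((pvALoop full seg i ll a N).2 : Nat) : Int)) none]
        = ll ++ pvConsHead (PySem.List.slice full (some (a : Int)) (some (i : Int))) (pvSplit seg N) := by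
  intro n
  induction n with
  | zero =>
    intro seg hlen full i a ll N hseg hai
    have hnil : seg = [] := List.eq_nil_of_length_eq_zero (by omega)
    subst hnil
    rw [pvSplit_eq_none (by rfl)]
    simp only [pvALoop, pvConsHead]
    rw [PySem.List.slice_from_natCast, PySem.List.slice_natCast]
    have h1 : (full.drop a).take (i - a) ++ ([] : List Int) = full.drop a := by
      rw [hseg]
      have h2 : full.drop i = (full.drop a).drop (i - a) := by
        rw [List.drop_drop]; congr 1; omega
      rw [h2]
      exact List.take_append_drop _ _
    rw [h1]
  | succ m ih =>
    intro seg hlen full i a ll N hseg hai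
    cases hscan : pvScan seg N with
    | none =>
      rw [pvALoop_scan_none seg N hscan full i ll a]
      rw [pvSplit_eq_none hscan]
      simp only [pvConsHead]
      rw [PySem.List.slice_from_natCast, PySem.List.slice_natCast]
      have h1 : (full.drop a).take (i - a) ++ seg = full.drop a := by
        rw [hseg]
        have h2 : full.drop i = (full.drop a).drop (i - a) := by
          rw [List.drop_drop]; congr 1; omega
        rw [h2]
        exact List.take_append_drop _ _
      rw [h1]
    | some t =>
      obtain ⟨j, x, N2⟩ := t
      have hd := pvScan_drop seg N j x N2 hscan
      have hj : j < seg.length := by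
        by_contra hge
        rw [List.drop_eq_nil_of_le (by omega)] at hd
        simp at hd
      rw [pvALoop_scan_some seg N j x N2 hscan full i ll a]
      have hcast : ((j : Int) + 1) = ((j + 1 : Nat) : Int) := by push_cast; ring
      have hsuffix : PySem.List.slice seg (some ((j : Int) + 1)) none = seg.drop (j + 1) := by
        rw [hcast, PySem.List.slice_from_natCast]
      have hseg' : seg.drop (j + 1) = full.drop (i + j + 1) := by
        rw [hseg, List.drop_drop]; congr 1
      have hrec := ih (seg.drop (j + 1)) (by simp; omega) full (i + j + 1) (i + j)
          (ll ++ [PySem.List.slice full (some (a : Int)) (some ((i + j : Nat) : Int))]) N2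
          hseg' (by omega)
      rw [hrec]
      rw [pvSplit_eq_some hscan, hsuffix]
      have hone : PySem.List.slice full (some ((i + j : Nat) : Int)) (some ((i + j + 1 : Nat) : Int)) = [x] := by
        rw [PySem.List.slice_natCast]
        have hfd : full.drop (i + j) = x :: seg.drop (j + 1) := by
          have h2 : full.drop (i + j) = seg.drop j := by
            rw [hseg, List.drop_drop]
          rw [h2, hd]
        rw [hfd]
        have e : i + j + 1 - (i + j) = 1 := by omega
        rw [e]
        rfl
      have hmerge : PySem.List.slice full (some (a : Int)) (some ((i + j : Nat) : Int))
          = PySem.List.slice full (some (a : Int)) (some (i : Int)) ++ PySem.List.slice seg none (some (j : Int)) := by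
        rw [PySem.List.slice_natCast, PySem.List.slice_natCast, PySem.List.slice_to_natCast, hseg]
        have h1 : full.drop i = (full.drop a).drop (i - a) := by
          rw [List.drop_drop]; congr 1; omega
        rw [h1, ← List.take_add]
        congr 1
        omega
      cases hsp : pvSplit (seg.drop (j + 1)) N2 with
      | nil => exact absurd hsp (pvSplit_ne_nil _ _)
      | cons r rs =>
        simp only [pvConsHead, hone, hmerge]
        simp

-- ===== VERDICT (by name: the statement is the Claim_ definition above) =====
theorem simDetectBlocks_spec : Claim_equal_simDetectBlocks := by
  intro lTokin _
  show simDetectBlocks lTokin = simDetectBlocks_alt lTokin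
  simp only [simDetectBlocks, simDetectBlocks_alt]
  rw [pvMain lTokin.length lTokin le_rfl lTokin 0 0 [] 3 rfl le_rfl]
  rw [PySem.List.slice_natCast]
  cases hsp : pvSplit lTokin 3 with
  | nil => exact absurd hsp (pvSplit_ne_nil _ _)
  | cons r rs => simp [pvConsHead]
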